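-- pv_equiv track=rewrite | github.com/minsuhaha/Coding-Test | 프로그래머스/2/169199. 리코쳇 로봇/리코쳇 로봇.py | solution
-- ===== SOURCE A (Python) =====
-- from collections import deque
--
-- def solution(board):
--     """
--     D : 장애물 위치 / G : 목표지점 / . : 빈 공간 / R : 로봇 처음 위치
--     로봇(R)이 목표지점(G)까지 최소거리로 도착해야 함
--     """
--
--     def bfs(x, y, move):
--         queue = deque([(x, y, move)])
--         visited[x][y] = True
--
--         while queue:
--             x, y, move = queue.popleft()
--
--             if board[x][y] == 'G':
--                 return move
--
--             for i in range(4):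
--                 nx, ny = x, y
--
--                 while True:
--                     nx += dx[i]
--                     ny += dy[i]
--
--                     if (nx<0 or nx>N-1 or ny<0 or ny >M-1) or board[nx][ny] == 'D':
--                         nx -= dx[i]
--                         ny -= dy[i]
--                         break
--
--                 if not visited[nx][ny]:
--                     queue.append((nx, ny, move+1))
--                     visited[nx][ny] = True
--         return -1
--
--
--     dx = [1, -1, 0, 0]
--     dy = [0, 0, -1, 1]
--     N, M = len(board), len(board[0])
--     visited = [[False]*M for _ in range(N)]
--     for i in range(N):
--         for j in range(M):
--             if board[i][j] == "R":
--                 return bfs(i, j, 0)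
-- ===== SOURCE B (Python) =====
-- def solution(board):
--     n, m = len(board), len(board[0])
--     cols = [''.join(row[j] for row in board) for j in range(m)]
--
--     def dests(p):
--         # slide destinations computed by scanning for the nearest wall 'D'
--         # in the precomputed row/column strings (no step-by-step walking)
--         x, y = p
--         r, c = board[x], cols[y]
--         k = c.find('D', x + 1, n)
--         down = ((n if k < 0 else k) - 1, y)
--         k = c.rfind('D', 0, x)
--         up = ((0 if k < 0 else k + 1), y)
--         k = r.rfind('D', 0, y)
--         left = (x, 0 if k < 0 else k + 1)
--         k = r.find('D', y + 1, m)
--         right = (x, (m if k < 0 else k) - 1)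
--         return (down, up, left, right)
--
--     for i, row in enumerate(board):
--         j = row.find('R', 0, m)
--         if j != -1:
--             start = (i, j)
--             break
--     else:
--         return None  # no robot: nothing to search from
--
--     seen = {start}
--     frontier = {start}
--     d = 0
--     while frontier:
--         if any(board[x][y] == 'G' for x, y in frontier):
--             return d
--         frontier = {t for p in frontier for t in dests(p)} - seen
--         seen |= frontier
--         d += 1
--     return -1
-- ===== Notes on version B (the rewrite author's own statement) =====
-- stated objective: alternative
-- what changed: Replaces A's deque-of-(x,y,move)-triples BFS with visited matrix and step-by-step slide walks by a frontier-set fixed-point iteration: slide destinations are computed by scanning precomputed row/column strings with str.find/str.rfind for the nearest wall, each new frontier is a set comprehension minus the seen set, and no queue, visited matrix or per-node move counter exists.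
-- outside the precondition, e.g. on solution(['..G']): A returns None, B returns None; on solution(['R.G', 'D']): A returns 1, B raises IndexError; on solution([]): A raises IndexError, B raises IndexError
import Mathlib
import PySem

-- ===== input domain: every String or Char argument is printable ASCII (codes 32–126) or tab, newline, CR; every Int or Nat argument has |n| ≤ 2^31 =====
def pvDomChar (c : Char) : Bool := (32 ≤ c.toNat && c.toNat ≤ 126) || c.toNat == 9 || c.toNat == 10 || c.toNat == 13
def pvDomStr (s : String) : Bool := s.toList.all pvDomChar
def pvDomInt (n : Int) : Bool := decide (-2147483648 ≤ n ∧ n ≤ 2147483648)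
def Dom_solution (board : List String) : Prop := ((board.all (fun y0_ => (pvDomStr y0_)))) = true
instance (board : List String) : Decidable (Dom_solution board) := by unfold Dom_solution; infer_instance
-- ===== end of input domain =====

-- B replaces A's deque BFS (per-node move counters, visited matrix, step-by-step slide
-- walks) by a frontier-set fixed-point iteration whose slide destinations are found by
-- scanning precomputed row / column strings for the nearest wall (alternative; no speed claim).
-- Both ports use a fuel counter only as a totality guard (A: one unit per dequeued node,
-- B: one unit per level); the fuel is never exhausted on inputs satisfying Pre_.

-- ===== PORT A =====
-- shared board/visited accessors (indices are only ever used in-bounds by both algorithms)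
def cellAt (board : List String) (x y : Int) : Char :=
  ((board.getD x.toNat "").toList.getD y.toNat ' ')
def vget (vis : List (List Bool)) (x y : Int) : Bool :=
  ((vis.getD x.toNat []).getD y.toNat false)
def vset (vis : List (List Bool)) (x y : Int) : List (List Bool) :=
  vis.set x.toNat ((vis.getD x.toNat []).set y.toNat true)

-- A's inner `while True`: advance nx,ny, then test and step back on failure
def slideA (board : List String) (N M dx dy : Int) : Nat → Int → Int → Int × Int
  | 0, x, y => (x, y)
  | f + 1, x, y =>
    let nx := x + dx
    let ny := y + dy
    if nx < 0 ∨ nx > N - 1 ∨ ny < 0 ∨ ny > M - 1 ∨ cellAt board nx ny = 'D' then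
      (nx - dx, ny - dy)
    else slideA board N M dx dy f nx ny

def dirsA : List (Int × Int) := [(1, 0), (-1, 0), (0, -1), (0, 1)]

-- body of A's `for i in range(4)` loop: append the slid cell to the queue if unvisited
def stepA (board : List String) (N M : Int) (move x y : Int)
    (st : List (Int × Int × Int) × List (List Bool)) (dir : Int × Int) :
    List (Int × Int × Int) × List (List Bool) :=
  let t := slideA board N M dir.1 dir.2 ((N + M).toNat + 1) x y
  if vget st.2 t.1 t.2 then st
  else (st.1 ++ [(t.1, t.2, move + 1)], vset st.2 t.1 t.2)

-- A's `while queue` loop; queue entries carry their own move counter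
def bfsA (board : List String) (N M : Int) : Nat → List (Int × Int × Int) → List (List Bool) → Int
  | _, [], _ => -1
  | 0, _ :: _, _ => -1
  | f + 1, (x, y, move) :: qs, vis =>
    if cellAt board x y = 'G' then move
    else
      let st := dirsA.foldl (stepA board N M move x y) (qs, vis)
      bfsA board N M f st.1 st.2

def solution (board : List String) : Int :=
  let n : Nat := board.length
  let m : Nat := (board.headD "").toList.length
  -- `for i in range(N): for j in range(M): if board[i][j] == 'R': return bfs(i, j, 0)`
  match (List.range n).findSome? (fun (i : Nat) =>
      (List.range m).findSome? (fun (j : Nat) =>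
        if cellAt board (i : Int) (j : Int) = 'R' then some ((i, j) : Nat × Nat) else none)) with
  | none => -1  -- Python A falls through and returns None here (outside Pre_)
  | some (si, sj) =>
    bfsA board (n : Int) (m : Int) (n * m + 1)
      [((si : Int), (sj : Int), 0)]
      (vset (List.replicate n (List.replicate m false)) (si : Int) (sj : Int))

-- ===== PORT B =====
-- hand port of `s.find('D', a, b)` for a single-char needle, as an Option over List Char
-- (exact for 0 ≤ a and b ≤ len(s), which is how B calls it inside Pre_)
def findD (cs : List Char) (a b : Nat) : Option Nat :=
  if h : a < b then (if cs.getD a ' ' = 'D' then some a else findD cs (a + 1) b) else none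
  termination_by b - a

-- hand port of `s.rfind('D', 0, b)`: the highest index k < b with s[k] = 'D'
-- (exact for b ≤ len(s), which is how B calls it inside Pre_)
def rfindD (cs : List Char) : Nat → Option Nat
  | 0 => none
  | b + 1 => if cs.getD b ' ' = 'D' then some b else rfindD cs b

-- `''.join(row[j] for row in board)` (exact when every row has more than j characters,
-- which Pre_ guarantees for j < len(board[0]))
def colStr (board : List String) (j : Nat) : List Char :=
  board.map (fun r => r.toList.getD j ' ')

-- B's dests(p): the four slide destinations (down, up, left, right) by wall scan
def destsB (board : List String) (cols : List (List Char)) (n m : Nat) (p : Int × Int) :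
    List (Int × Int) :=
  let x := p.1.toNat
  let y := p.2.toNat
  let r := (board.getD x "").toList
  let c := cols.getD y []
  [ ((((findD c (x + 1) n).getD n : Int) - 1), p.2),
    ((match rfindD c x with | none => 0 | some k => (k : Int) + 1), p.2),
    (p.1, (match rfindD r y with | none => 0 | some k => (k : Int) + 1)),
    (p.1, (((findD r (y + 1) m).getD m : Int) - 1)) ]

-- hand port of `row.find('R', 0, m)` as an Option: first 'R' among the first m characters
def rowFindB : List Char → Nat → Option Nat
  | _, 0 => none
  | [], _ + 1 => none
  | c :: cs, m + 1 => if c = 'R' then some 0 else (rowFindB cs m).map (· + 1)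

-- B's `for i, row in enumerate(board)` search for the robot
def findStartB : List String → Nat → Nat → Option (Nat × Nat)
  | [], _, _ => none
  | r :: rs, i, m =>
    match rowFindB r.toList m with
    | some j => some (i, j)
    | none => findStartB rs (i + 1) m

-- B's `while frontier:` loop over frontier/seen sets; `d` is the current depth
def bfsS (board : List String) (cols : List (List Char)) (n m : Nat) :
    Nat → PySem.Set (Int × Int) → PySem.Set (Int × Int) → Int → Int
  | 0, _, _, _ => -1
  | f + 1, frontier, seen, d =>
    match frontier with
    | [] => -1
    | _ :: _ =>
      if frontier.any (fun p => cellAt board p.1 p.2 == 'G') then d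
      else
        let fr := PySem.Set.diff
          (PySem.Set.ofList (frontier.flatMap (destsB board cols n m))) seen
        bfsS board cols n m f fr (PySem.Set.union seen fr) (d + 1)

def solution_alt (board : List String) : Int :=
  let n : Nat := board.length
  let m : Nat := (board.headD "").toList.length
  let cols : List (List Char) := (List.range m).map (colStr board)
  match findStartB board 0 m with
  | none => -1  -- Python B returns None here (outside Pre_, where no int is returned)
  | some (si, sj) =>
    bfsS board cols n m (n * m + 2)
      [((si : Int), (sj : Int))] [((si : Int), (sj : Int))] 0

-- ===== PRECONDITION & SPEC =====
-- Pre_ excludes boards on which Python A does not return an int: an empty board (IndexError on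
-- board[0]), boards with a row shorter than row 0 (A can raise IndexError mid-slide and B's
-- column construction raises), and boards whose first len(board[0]) columns contain no 'R'
-- (both Pythons return None there, not an int).
def Pre_solution (board : List String) : Prop :=
  board ≠ [] ∧
  (∀ row ∈ board, (board.headD "").toList.length ≤ row.toList.length) ∧
  (∃ i ∈ List.range board.length, ∃ j ∈ List.range (board.headD "").toList.length,
      ((board.getD i "").toList.getD j ' ') = 'R')
instance (board : List String) : Decidable (Pre_solution board) := by
  unfold Pre_solution; infer_instance

def pvWitness_solution : List String := ["R.G", "D.."]

def Spec_solution (board : List String) (out : Int) : Prop := out = solution_alt board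
instance (board : List String) (out : Int) : Decidable (Spec_solution board out) := by
  unfold Spec_solution; infer_instance

-- ===== CLAIM (what is proved, stated in full; the proofs are below) =====
def Claim_equal_solution : Prop :=
  ∀ (board : List String), Dom_solution board → Pre_solution board →
    Spec_solution board (solution board)

-- ===== LEMMAS AND PROOFS =====

-- ---- proof-side helpers ----

-- A's BFS with the move counter stripped from the queue: current level `cur`,
-- next level `next`, depth `d` (intermediate between the two ports)
def stepL (board : List String) (N M : Int) (x y : Int)
    (st : List (Int × Int) × List (List Bool)) (dir : Int × Int) :
    List (Int × Int) × List (List Bool) :=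
  let t := slideA board N M dir.1 dir.2 ((N + M).toNat + 1) x y
  if vget st.2 t.1 t.2 then st
  else (st.1 ++ [t], vset st.2 t.1 t.2)

def bfsL (board : List String) (N M : Int) :
    Nat → List (Int × Int) → List (Int × Int) → Int → List (List Bool) → Int
  | _, [], [], _, _ => -1
  | f, [], t :: ts, d, vis => bfsL board N M f (t :: ts) [] (d + 1) vis
  | 0, _ :: _, _, _, _ => -1
  | f + 1, (x, y) :: cs, next, d, vis =>
    if cellAt board x y = 'G' then d
    else
      let st := dirsA.foldl (stepL board N M x y) (next, vis)
      bfsL board N M f cs st.1 d st.2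
  termination_by f cur _ _ _ => 2 * f + (if cur.isEmpty then 1 else 0)
  decreasing_by
    all_goals simp
    all_goals ((try split) <;> omega)

def mapD (d : Int) (l : List (Int × Int)) : List (Int × Int × Int) :=
  l.map (fun p => (p.1, p.2, d))

@[simp] lemma mapD_nil (d : Int) : mapD d [] = [] := rfl
@[simp] lemma mapD_cons (d : Int) (p : Int × Int) (l : List (Int × Int)) :
    mapD d (p :: l) = (p.1, p.2, d) :: mapD d l := rfl
lemma mapD_append (d : Int) (l₁ l₂ : List (Int × Int)) :
    mapD d (l₁ ++ l₂) = mapD d l₁ ++ mapD d l₂ := List.map_append ..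

-- the direction fold of A acting on a queue `pre ++ mapD (d+1) next` mirrors bfsL's fold
lemma fold_rel (board : List String) (N M d x y : Int) :
    ∀ (dirs : List (Int × Int)) (pre : List (Int × Int × Int)) (next : List (Int × Int))
      (vis : List (List Bool)),
      dirs.foldl (stepA board N M d x y) (pre ++ mapD (d + 1) next, vis)
        = (pre ++ mapD (d + 1) (dirs.foldl (stepL board N M x y) (next, vis)).1,
           (dirs.foldl (stepL board N M x y) (next, vis)).2) := by
  intro dirs
  induction dirs with
  | nil => intro pre next vis; rfl
  | cons dir dirs ih =>
    intro pre next vis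
    simp only [List.foldl_cons]
    have hstep : stepA board N M d x y (pre ++ mapD (d + 1) next, vis) dir
        = (pre ++ mapD (d + 1) (stepL board N M x y (next, vis) dir).1,
           (stepL board N M x y (next, vis) dir).2) := by
      simp only [stepA, stepL]
      by_cases h : vget vis (slideA board N M dir.1 dir.2 ((N + M).toNat + 1) x y).1
          (slideA board N M dir.1 dir.2 ((N + M).toNat + 1) x y).2 = true
      · simp [h]
      · simp only [Bool.not_eq_true] at h
        simp [h, mapD_append, List.append_assoc]
    rw [hstep, ih]

-- the simulation: A's queue is always `current frontier at depth d ++ next frontier at depth d+1`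
lemma sim (board : List String) (N M : Int) :
    ∀ (f : Nat) (x y : Int) (cs next : List (Int × Int)) (d : Int) (vis : List (List Bool)),
      bfsA board N M f ((x, y, d) :: (mapD d cs ++ mapD (d + 1) next)) vis
        = bfsL board N M f ((x, y) :: cs) next d vis := by
  intro f
  induction f with
  | zero => intro x y cs next d vis; simp [bfsA, bfsL]
  | succ f ih =>
    intro x y cs next d vis
    simp only [bfsA, bfsL]
    by_cases hg : cellAt board x y = 'G'
    · simp [hg]
    · rw [if_neg hg, if_neg hg]
      rw [fold_rel board N M d x y dirsA (mapD d cs) next vis]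
      set st := dirsA.foldl (stepL board N M x y) (next, vis) with hst
      match cs with
      | c :: cs' =>
        simpa using ih c.1 c.2 cs' st.1 d st.2
      | [] =>
        simp only [mapD_nil, List.nil_append]
        match hnext : st.1 with
        | [] => simp [bfsA, bfsL]
        | t :: ts =>
          have := ih t.1 t.2 ts [] (d + 1) st.2
          simp only [mapD_nil, List.append_nil] at this
          simpa [bfsL] using this

-- helper: mapping a function over the result of findSome?
lemma findSome?_omap {α β γ : Type} (g : β → γ) :
    ∀ (l : List α) (f : α → Option β),
      l.findSome? (fun x => (f x).map g) = (l.findSome? f).map g := by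
  intro l
  induction l with
  | nil => intro f; rfl
  | cons a l ih =>
    intro f
    simp only [List.findSome?_cons]
    match h : f a with
    | some b => simp [h]
    | none => simp [h, ih]

-- B's bounded row scan equals A's `for j in range(M)` scan of one row
lemma rowFind_eq : ∀ (row : List Char) (m : Nat),
    rowFindB row m
      = (List.range m).findSome? (fun j => if row.getD j ' ' = 'R' then some j else none) := by
  intro row
  induction row with
  | nil =>
    intro m
    match m with
    | 0 => rfl
    | m + 1 =>
      simp only [rowFindB]
      symm
      rw [List.findSome?_eq_none_iff]
      intro j hj
      simp
  | cons c cs ih =>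
    intro m
    match m with
    | 0 => rfl
    | m + 1 =>
      simp only [rowFindB, List.range_succ_eq_map, List.findSome?_cons]
      by_cases hc : c = 'R'
      · simp [hc]
      · simp only [List.getD_cons_zero, if_neg hc]
        rw [List.findSome?_map]
        have : ((fun j => if (c :: cs).getD j ' ' = 'R' then some j else none) ∘ Nat.succ)
            = fun j => (if cs.getD j ' ' = 'R' then some j else none).map (· + 1) := by
          funext j
          simp only [Function.comp, List.getD_cons_succ]
          by_cases h : cs.getD j ' ' = 'R' <;> simp [h]
        rw [this, findSome?_omap, ih]

-- each cell of A's inner scan is B's row scan with the column index post-processed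
lemma inner_eq {β : Type} (row : String) (m : Nat) (g : Nat → β) :
    (List.range m).findSome? (fun j =>
        if (row.toList.getD j ' ') = 'R' then some (g j) else none)
      = (rowFindB row.toList m).map g := by
  rw [rowFind_eq]
  rw [← findSome?_omap g]
  congr 1
  funext j
  by_cases h : (row.toList.getD j ' ') = 'R' <;> simp [h]

-- B's structural row search equals A's double `range` scan (with a row offset `i`)
lemma findStart_eq : ∀ (rows : List String) (m : Nat) (i : Nat),
    findStartB rows i m
      = ((List.range rows.length).findSome? (fun k =>
          (List.range m).findSome? (fun j =>
            if ((rows.getD k "").toList.getD j ' ') = 'R' then some (k, j) else none))).map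
          (fun p => (p.1 + i, p.2)) := by
  intro rows
  induction rows with
  | nil => intro m i; rfl
  | cons r rs ih =>
    intro m i
    simp only [findStartB, List.length_cons, List.range_succ_eq_map, List.findSome?_cons,
      List.getD_cons_zero]
    rw [inner_eq r m (fun j => ((0 : Nat), j))]
    match hr : rowFindB r.toList m with
    | some j => simp
    | none =>
      simp only [Option.map_none]
      rw [List.findSome?_map]
      have hshift : ((fun k => (List.range m).findSome? (fun j =>
          if (((r :: rs).getD k "").toList.getD j ' ') = 'R' then some (k, j) else none))
            ∘ Nat.succ)
          = fun k => ((List.range m).findSome? (fun j =>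
              if ((rs.getD k "").toList.getD j ' ') = 'R' then some (k, j) else none)).map
              (fun p => (p.1 + 1, p.2)) := by
        funext k
        simp only [Function.comp, List.getD_cons_succ]
        rw [inner_eq (rs.getD k "") m (fun j => (k + 1, j)),
            inner_eq (rs.getD k "") m (fun j => (k, j)), Option.map_map]
        rfl
      rw [hshift, findSome?_omap, ih m (i + 1), Option.map_map]
      congr 1
      funext p
      simp only [Function.comp, Prod.mk.injEq]
      exact ⟨by omega, trivial⟩

-- ---- scan characterisation of A's slide walks ----

lemma findD_some_bounds : ∀ (cs : List Char) (a b k : Nat),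
    findD cs a b = some k → a ≤ k ∧ k < b := by
  intro cs a b k h
  fun_induction findD cs a b with
  | case1 a hab hD => simp_all
  | case2 a hab hD ih => exact ⟨by have := (ih h).1; omega, (ih h).2⟩
  | case3 a hab => simp_all

lemma rfindD_some_lt : ∀ (cs : List Char) (b k : Nat), rfindD cs b = some k → k < b := by
  intro cs b
  induction b with
  | zero => intro k h; simp [rfindD] at h
  | succ b ih =>
    intro k h
    simp only [rfindD] at h
    split at h
    · simp_all
    · have := ih k h; omega

lemma cell_row (board : List String) (x j : Nat) :
    cellAt board (x : Int) (j : Int) = ((board.getD x "").toList.getD j ' ') := by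
  simp [cellAt]

lemma cell_col (board : List String) (x y : Nat) (hx : x < board.length) :
    cellAt board (x : Int) (y : Int) = (colStr board y).getD x ' ' := by
  simp [cellAt, colStr, List.getD_eq_getElem?_getD, List.getElem?_map,
    List.getElem?_eq_getElem hx]

lemma slide_right (board : List String) (n m : Nat) :
    ∀ (f x y : Nat), x < n → y < m → m - y ≤ f →
      slideA board (n : Int) (m : Int) 0 1 f (x : Int) (y : Int)
        = ((x : Int), (((findD (board.getD x "").toList (y + 1) m).getD m : Int) - 1)) := by
  intro f
  induction f with
  | zero => intro x y hx hy hf; omega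
  | succ f ih =>
    intro x y hx hy hf
    have hcx : ((x : Int) + 0) = ((x : Nat) : Int) := by ring
    have hcy : ((y : Int) + 1) = (((y + 1 : Nat)) : Int) := by push_cast; ring
    have hcell : cellAt board ((x : Int) + 0) ((y : Int) + 1)
        = (board.getD x "").toList.getD (y + 1) ' ' := by
      rw [hcx, hcy, cell_row]
    simp only [slideA]
    by_cases hyM : y + 1 < m
    · by_cases hD : (board.getD x "").toList.getD (y + 1) ' ' = 'D'
      · rw [if_pos (Or.inr (Or.inr (Or.inr (Or.inr (hcell.trans hD)))))]
        rw [findD]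
        simp only [hyM, dif_pos, hD, if_pos]
        simp only [Option.getD_some, Prod.mk.injEq]
        constructor <;> push_cast <;> ring
      · rw [if_neg (by
          intro h
          rcases h with h | h | h | h | h
          · omega
          · have : (x : Int) ≤ (n : Int) - 1 := by push_cast; omega
            omega
          · omega
          · have : (y : Int) + 1 ≤ (m : Int) - 1 := by push_cast; omega
            omega
          · exact hD (hcell ▸ h))]
        rw [hcx, hcy, ih x (y + 1) hx hyM (by omega)]
        rw [show findD (board.getD x "").toList (y + 1) m
            = findD (board.getD x "").toList (y + 1 + 1) m from by
          rw [findD]; simp only [hyM, dif_pos]; rw [if_neg hD]]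
    · rw [if_pos (Or.inr (Or.inr (Or.inr (Or.inl (by push_cast; omega)))))]
      rw [show findD (board.getD x "").toList (y + 1) m = none from by
        rw [findD]; simp [hyM]]
      simp only [Option.getD_none, Prod.mk.injEq]
      constructor <;> push_cast <;> [ring; omega]

lemma slide_left (board : List String) (n m : Nat) :
    ∀ (f x y : Nat), x < n → y < m → y + 1 ≤ f →
      slideA board (n : Int) (m : Int) 0 (-1) f (x : Int) (y : Int)
        = ((x : Int), (match rfindD (board.getD x "").toList y with
            | none => 0 | some k => (k : Int) + 1)) := by
  intro f
  induction f with
  | zero => intro x y hx hy hf; omega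
  | succ f ih =>
    intro x y hx hy hf
    simp only [slideA]
    match y with
    | 0 =>
      rw [if_pos (Or.inr (Or.inr (Or.inl (by norm_num))))]
      simp [rfindD]
    | y' + 1 =>
      have hcx : ((x : Int) + 0) = ((x : Nat) : Int) := by ring
      have hcy : (((y' + 1 : Nat) : Int) + -1) = ((y' : Nat) : Int) := by push_cast; ring
      have hcell : cellAt board ((x : Int) + 0) (((y' + 1 : Nat) : Int) + -1)
          = (board.getD x "").toList.getD y' ' ' := by
        rw [hcx, hcy, cell_row]
      by_cases hD : (board.getD x "").toList.getD y' ' ' = 'D'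
      · rw [if_pos (Or.inr (Or.inr (Or.inr (Or.inr (hcell.trans hD)))))]
        rw [show rfindD (board.getD x "").toList (y' + 1) = some y' from by
          simp only [rfindD]; rw [if_pos hD]]
        simp only [Prod.mk.injEq]
        constructor <;> push_cast <;> ring
      · rw [if_neg (by
          intro h
          rcases h with h | h | h | h | h
          · omega
          · have : (x : Int) ≤ (n : Int) - 1 := by push_cast; omega
            omega
          · rw [show (((y' + 1 : Nat) : Int) + -1) = ((y' : Nat) : Int) from hcy] at h
            omega
          · rw [hcy] at h
            have : ((y' : Nat) : Int) ≤ (m : Int) - 1 := by push_cast; omega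
            omega
          · exact hD (hcell ▸ h))]
        rw [hcx, hcy, ih x y' hx (by omega) (by omega)]
        rw [show rfindD (board.getD x "").toList (y' + 1)
            = rfindD (board.getD x "").toList y' from by
          simp only [rfindD]; rw [if_neg hD]]

lemma slide_down (board : List String) (n m : Nat) (hn : board.length = n) :
    ∀ (f x y : Nat), x < n → y < m → n - x ≤ f →
      slideA board (n : Int) (m : Int) 1 0 f (x : Int) (y : Int)
        = ((((findD (colStr board y) (x + 1) n).getD n : Int) - 1), (y : Int)) := by
  intro f
  induction f with
  | zero => intro x y hx hy hf; omega
  | succ f ih =>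
    intro x y hx hy hf
    have hcx : ((x : Int) + 1) = (((x + 1 : Nat)) : Int) := by push_cast; ring
    have hcy : ((y : Int) + 0) = ((y : Nat) : Int) := by ring
    simp only [slideA]
    by_cases hxN : x + 1 < n
    · have hcell : cellAt board ((x : Int) + 1) ((y : Int) + 0)
          = (colStr board y).getD (x + 1) ' ' := by
        rw [hcx, hcy, cell_col board (x + 1) y (by omega)]
      by_cases hD : (colStr board y).getD (x + 1) ' ' = 'D'
      · rw [if_pos (Or.inr (Or.inr (Or.inr (Or.inr (hcell.trans hD)))))]
        rw [findD]
        simp only [hxN, dif_pos, hD, if_pos]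
        simp only [Option.getD_some, Prod.mk.injEq]
        constructor <;> push_cast <;> ring
      · rw [if_neg (by
          intro h
          rcases h with h | h | h | h | h
          · omega
          · have : (x : Int) + 1 ≤ (n : Int) - 1 := by push_cast; omega
            omega
          · omega
          · have : (y : Int) ≤ (m : Int) - 1 := by push_cast; omega
            omega
          · exact hD (hcell ▸ h))]
        rw [hcx, hcy, ih (x + 1) y hxN hy (by omega)]
        rw [show findD (colStr board y) (x + 1) n
            = findD (colStr board y) (x + 1 + 1) n from by
          rw [findD]; simp only [hxN, dif_pos]; rw [if_neg hD]]
    · rw [if_pos (Or.inr (Or.inl (by push_cast; omega)))]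
      rw [show findD (colStr board y) (x + 1) n = none from by
        rw [findD]; simp [hxN]]
      simp only [Option.getD_none, Prod.mk.injEq]
      constructor <;> push_cast <;> [omega; ring]

lemma slide_up (board : List String) (n m : Nat) (hn : board.length = n) :
    ∀ (f x y : Nat), x < n → y < m → x + 1 ≤ f →
      slideA board (n : Int) (m : Int) (-1) 0 f (x : Int) (y : Int)
        = ((match rfindD (colStr board y) x with | none => 0 | some k => (k : Int) + 1),
            (y : Int)) := by
  intro f
  induction f with
  | zero => intro x y hx hy hf; omega
  | succ f ih =>
    intro x y hx hy hf
    simp only [slideA]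
    match x with
    | 0 =>
      rw [if_pos (Or.inl (by norm_num))]
      simp [rfindD]
    | x' + 1 =>
      have hcx : (((x' + 1 : Nat) : Int) + -1) = ((x' : Nat) : Int) := by push_cast; ring
      have hcy : ((y : Int) + 0) = ((y : Nat) : Int) := by ring
      have hcell : cellAt board (((x' + 1 : Nat) : Int) + -1) ((y : Int) + 0)
          = (colStr board y).getD x' ' ' := by
        rw [hcx, hcy, cell_col board x' y (by omega)]
      by_cases hD : (colStr board y).getD x' ' ' = 'D'
      · rw [if_pos (Or.inr (Or.inr (Or.inr (Or.inr (hcell.trans hD)))))]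
        rw [show rfindD (colStr board y) (x' + 1) = some x' from by
          simp only [rfindD]; rw [if_pos hD]]
        simp only [Prod.mk.injEq]
        constructor <;> push_cast <;> ring
      · rw [if_neg (by
          intro h
          rcases h with h | h | h | h | h
          · rw [hcx] at h
            omega
          · rw [hcx] at h
            have : ((x' : Nat) : Int) ≤ (n : Int) - 1 := by push_cast; omega
            omega
          · omega
          · have : (y : Int) ≤ (m : Int) - 1 := by push_cast; omega
            omega
          · exact hD (hcell ▸ h))]
        rw [hcx, hcy, ih x' y (by omega) hy (by omega)]
        rw [show rfindD (colStr board y) (x' + 1) = rfindD (colStr board y) x' from by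
          simp only [rfindD]; rw [if_neg hD]]

-- in-bounds cells
def InB (n m : Nat) (p : Int × Int) : Prop :=
  0 ≤ p.1 ∧ p.1 < (n : Int) ∧ 0 ≤ p.2 ∧ p.2 < (m : Int)

lemma dests_eq (board : List String) (n m : Nat) (hn : board.length = n)
    (x y : Nat) (hx : x < n) (hy : y < m) :
    dirsA.map (fun dir =>
        slideA board (n : Int) (m : Int) dir.1 dir.2 (((n : Int) + (m : Int)).toNat + 1)
          (x : Int) (y : Int))
      = destsB board ((List.range m).map (colStr board)) n m ((x : Int), (y : Int)) := by
  have hfuel : ((n : Int) + (m : Int)).toNat + 1 = n + m + 1 := by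
    push_cast; omega
  simp only [dirsA, List.map_cons, List.map_nil, hfuel]
  rw [slide_down board n m hn (n + m + 1) x y hx hy (by omega),
    slide_up board n m hn (n + m + 1) x y hx hy (by omega),
    slide_left board n m (n + m + 1) x y hx hy (by omega),
    slide_right board n m (n + m + 1) x y hx hy (by omega)]
  simp [destsB, Int.toNat_natCast, List.getD_eq_getElem?_getD, List.getElem?_map,
    List.getElem?_range, hy]

lemma dests_inb (board : List String) (n m : Nat) (cols : List (List Char)) (p : Int × Int)
    (hp : InB n m p) : ∀ q ∈ destsB board cols n m p, InB n m q := by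
  obtain ⟨h1, h2, h3, h4⟩ := hp
  have hn : 0 < n := by omega
  have hm : 0 < m := by omega
  intro q hq
  simp only [destsB, List.mem_cons, List.mem_singleton, List.not_mem_nil, or_false] at hq
  rcases hq with hq | hq | hq | hq <;> subst hq <;> refine ⟨?_, ?_, ?_, ?_⟩
  · match hfd : findD (cols.getD p.2.toNat []) (p.1.toNat + 1) n with
    | none => simp; try omega
    | some k =>
      have := findD_some_bounds _ _ _ _ hfd
      simp; try omega
  · match hfd : findD (cols.getD p.2.toNat []) (p.1.toNat + 1) n with
    | none => simp; try omega
    | some k =>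
      have := findD_some_bounds _ _ _ _ hfd
      simp; try omega
  · exact h3
  · exact h4
  · match hfd : rfindD (cols.getD p.2.toNat []) p.1.toNat with
    | none => simp
    | some k => simp; try omega
  · match hfd : rfindD (cols.getD p.2.toNat []) p.1.toNat with
    | none => simp; try omega
    | some k =>
      have := rfindD_some_lt _ _ _ hfd
      simp; try omega
  · exact h3
  · exact h4
  · exact h1
  · exact h2
  · match hfd : rfindD (board.getD p.1.toNat "").toList p.2.toNat with
    | none => simp
    | some k => simp; try omega
  · match hfd : rfindD (board.getD p.1.toNat "").toList p.2.toNat with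
    | none => simp; try omega
    | some k =>
      have := rfindD_some_lt _ _ _ hfd
      simp; try omega
  · exact h1
  · exact h2
  · match hfd : findD (board.getD p.1.toNat "").toList (p.2.toNat + 1) m with
    | none => simp; try omega
    | some k =>
      have := findD_some_bounds _ _ _ _ hfd
      simp; try omega
  · match hfd : findD (board.getD p.1.toNat "").toList (p.2.toNat + 1) m with
    | none => simp; try omega
    | some k =>
      have := findD_some_bounds _ _ _ _ hfd
      simp; try omega

-- ---- visited-matrix bookkeeping ----

def VisWF (n m : Nat) (vis : List (List Bool)) : Prop :=
  vis.length = n ∧ ∀ row ∈ vis, row.length = m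

def Marks (n m : Nat) (vis : List (List Bool)) (seen : List (Int × Int)) : Prop :=
  ∀ p : Int × Int, InB n m p → (vget vis p.1 p.2 = true ↔ p ∈ seen)

def Uc (vis : List (List Bool)) : Nat := (vis.map (fun row => row.count false)).sum

lemma getD_set_self {α : Type} (l : List α) (i : Nat) (a d : α) (h : i < l.length) :
    (l.set i a).getD i d = a := by
  rw [List.getD_eq_getElem?_getD, List.getElem?_set_self h, Option.getD_some]

lemma getD_set_ne {α : Type} (l : List α) (i j : Nat) (a d : α) (h : i ≠ j) :
    (l.set i a).getD j d = l.getD j d := by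
  rw [List.getD_eq_getElem?_getD, List.getElem?_set_ne h, ← List.getD_eq_getElem?_getD]

lemma row_len (n m : Nat) (vis : List (List Bool)) (hwf : VisWF n m vis) (i : Nat)
    (hi : i < n) : (vis.getD i []).length = m := by
  obtain ⟨hl, hr⟩ := hwf
  have : i < vis.length := by omega
  rw [List.getD_eq_getElem?_getD, List.getElem?_eq_getElem this]
  exact hr _ (List.getElem_mem this)

lemma vget_vset_self (n m : Nat) (vis : List (List Bool)) (p : Int × Int)
    (hwf : VisWF n m vis) (hp : InB n m p) :
    vget (vset vis p.1 p.2) p.1 p.2 = true := by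
  obtain ⟨h1, h2, h3, h4⟩ := hp
  have hi : p.1.toNat < vis.length := by obtain ⟨hl, _⟩ := hwf; omega
  have hj : p.2.toNat < (vis.getD p.1.toNat []).length := by
    rw [row_len n m vis hwf p.1.toNat (by omega)]; omega
  simp only [vget, vset]
  rw [getD_set_self _ _ _ _ hi, getD_set_self _ _ _ _ hj]

lemma vget_vset_other (n m : Nat) (vis : List (List Bool)) (p q : Int × Int)
    (hwf : VisWF n m vis) (hp : InB n m p) (hq : InB n m q) (hne : q ≠ p) :
    vget (vset vis p.1 p.2) q.1 q.2 = vget vis q.1 q.2 := by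
  obtain ⟨a1, a2, a3, a4⟩ := hp
  obtain ⟨b1, b2, b3, b4⟩ := hq
  have hi : p.1.toNat < vis.length := by obtain ⟨hl, _⟩ := hwf; omega
  simp only [vget, vset]
  by_cases hx : q.1.toNat = p.1.toNat
  · have hxx : q.1 = p.1 := by omega
    have hy : q.2.toNat ≠ p.2.toNat := by
      intro h
      exact hne (Prod.ext hxx (by omega))
    rw [hx, getD_set_self _ _ _ _ hi, getD_set_ne _ _ _ _ _ (fun h => hy h.symm)]
  · rw [getD_set_ne _ _ _ _ _ (fun h => hx h.symm)]

lemma vset_wf (n m : Nat) (vis : List (List Bool)) (p : Int × Int)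
    (hwf : VisWF n m vis) (hp : InB n m p) : VisWF n m (vset vis p.1 p.2) := by
  obtain ⟨hl, hr⟩ := hwf
  refine ⟨by simp [vset, hl], ?_⟩
  intro row hrow
  rcases List.mem_or_eq_of_mem_set hrow with h | h
  · exact hr _ h
  · subst h
    rw [List.length_set]
    exact row_len n m vis ⟨hl, hr⟩ p.1.toNat (by obtain ⟨a1, a2, _, _⟩ := hp; omega)

lemma count_set_true (row : List Bool) (j : Nat) (hj : j < row.length)
    (hf : row.getD j false = false) :
    (row.set j true).count false + 1 = row.count false := by
  induction row generalizing j with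
  | nil => simp at hj
  | cons b bs ih =>
    match j with
    | 0 =>
      simp only [List.getD_cons_zero] at hf
      subst hf
      simp [List.count_cons]
    | j + 1 =>
      simp only [List.getD_cons_succ] at hf
      simp only [List.set_cons_succ, List.count_cons]
      have := ih j (by simpa using hj) hf
      omega

lemma sum_map_set {α : Type} (f : α → Nat) (dflt : α) :
    ∀ (l : List α) (i : Nat), i < l.length →
      ((l.set i dflt).map f).sum + f (l.getD i dflt) = (l.map f).sum + f dflt := by
  intro l
  induction l with
  | nil => intro i hi; simp at hi
  | cons a l ih =>
    intro i hi
    match i with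
    | 0 => simp [List.set_cons_zero]; omega
    | i + 1 =>
      simp only [List.set_cons_succ, List.map_cons, List.sum_cons, List.getD_cons_succ]
      have := ih i (by simpa using hi)
      omega

lemma Uc_vset (n m : Nat) (vis : List (List Bool)) (p : Int × Int)
    (hwf : VisWF n m vis) (hp : InB n m p) (hfalse : vget vis p.1 p.2 = false) :
    Uc (vset vis p.1 p.2) + 1 = Uc vis := by
  obtain ⟨a1, a2, a3, a4⟩ := hp
  have hi : p.1.toNat < vis.length := by obtain ⟨hl, _⟩ := hwf; omega
  have hj : p.2.toNat < (vis.getD p.1.toNat []).length := by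
    rw [row_len n m vis hwf p.1.toNat (by omega)]; omega
  simp only [Uc, vset]
  set row := vis.getD p.1.toNat [] with hrow
  have hcount := count_set_true row p.2.toNat hj (by simpa [vget] using hfalse)
  have hs := sum_map_set (fun r => r.count false) (row.set p.2.toNat true) vis p.1.toNat hi
  -- hs : ((vis.set i r').map f).sum + f (vis.getD i r') = (vis.map f).sum + f r'
  -- careful: getD default is r' here, but i < length so getD default irrelevant
  have hg : vis.getD p.1.toNat (row.set p.2.toNat true) = row := by
    rw [List.getD_eq_getElem?_getD, List.getElem?_eq_getElem hi, Option.getD_some, hrow,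
      List.getD_eq_getElem?_getD, List.getElem?_eq_getElem hi, Option.getD_some]
  rw [hg] at hs
  dsimp only at hs ⊢
  omega

lemma Marks_vset (n m : Nat) (vis : List (List Bool)) (seen : List (Int × Int)) (p : Int × Int)
    (hwf : VisWF n m vis) (hp : InB n m p) (hm : Marks n m vis seen) :
    Marks n m (vset vis p.1 p.2) (seen ++ [p]) := by
  intro q hq
  by_cases hqp : q = p
  · subst hqp
    simp [vget_vset_self n m vis q hwf hq]
  · rw [vget_vset_other n m vis p q hwf hp hq hqp]
    rw [hm q hq]
    simp [hqp]

-- ---- the level expansion, characterised ----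

def addOne (st : List (Int × Int) × List (List Bool)) (t : Int × Int) :
    List (Int × Int) × List (List Bool) :=
  if vget st.2 t.1 t.2 then st else (st.1 ++ [t], vset st.2 t.1 t.2)

def addAll (st : List (Int × Int) × List (List Bool)) (l : List (Int × Int)) :
    List (Int × Int) × List (List Bool) :=
  l.foldl addOne st

-- the list `Set.diff (Set.ofList l) seen` computed by a single left-to-right pass
def dedupNew (l seen : List (Int × Int)) : List (Int × Int) :=
  match l with
  | [] => []
  | t :: ts => if t ∈ seen then dedupNew ts seen else t :: dedupNew ts (seen ++ [t])

lemma dedupNew_eq_diff : ∀ (l seen : List (Int × Int)),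
    PySem.Set.diff (PySem.Set.ofList l) seen = dedupNew l seen := by
  intro l
  induction l with
  | nil => intro seen; rfl
  | cons t ts ih =>
    intro seen
    rw [PySem.Set.ofList_cons]
    by_cases ht : t ∈ seen
    · simp only [dedupNew, if_pos ht]
      rw [← ih seen]
      simp only [PySem.Set.diff, PySem.Set.discard]
      rw [List.filter_cons, if_neg (by simp [List.contains_iff_mem, ht]),
        List.filter_filter]
      apply List.filter_congr
      intro x _
      by_cases hx : x = t
      · subst hx
        simp [List.contains_iff_mem, ht]
      · simp [hx]
    · simp only [dedupNew, if_neg ht]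
      rw [← ih (seen ++ [t])]
      simp only [PySem.Set.diff, PySem.Set.discard]
      rw [List.filter_cons, if_pos (by simp [List.contains_iff_mem, ht]),
        List.filter_filter]
      congr 1
      apply List.filter_congr
      intro x _
      by_cases hx : x = t
      · subst hx
        simp [List.contains_iff_mem]
      · by_cases hs : x ∈ seen <;> simp [hx, hs, List.contains_iff_mem]

lemma mem_dedupNew : ∀ (l seen : List (Int × Int)) (q : Int × Int),
    q ∈ dedupNew l seen → q ∈ l := by
  intro l
  induction l with
  | nil => intro seen q h; simp [dedupNew] at h
  | cons t ts ih =>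
    intro seen q h
    simp only [dedupNew] at h
    split at h
    · exact List.mem_cons_of_mem _ (ih _ _ h)
    · rcases List.mem_cons.mp h with h | h
      · exact h ▸ List.mem_cons_self
      · exact List.mem_cons_of_mem _ (ih _ _ h)

lemma addAll_spec (board : List String) (n m : Nat) :
    ∀ (l : List (Int × Int)) (acc : List (Int × Int)) (vis : List (List Bool))
      (seen : List (Int × Int)),
      VisWF n m vis → Marks n m vis seen → (∀ t ∈ l, InB n m t) →
      (addAll (acc, vis) l).1 = acc ++ dedupNew l seen
      ∧ VisWF n m (addAll (acc, vis) l).2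
      ∧ Marks n m (addAll (acc, vis) l).2 (seen ++ dedupNew l seen)
      ∧ Uc (addAll (acc, vis) l).2 + (dedupNew l seen).length = Uc vis := by
  intro l
  induction l with
  | nil =>
    intro acc vis seen hwf hm hl
    exact ⟨by simp [addAll, dedupNew], by simpa [addAll] using hwf,
      by simpa [addAll, dedupNew] using hm, by simp [addAll, dedupNew]⟩
  | cons t ts ih =>
    intro acc vis seen hwf hm hl
    have hInB : InB n m t := hl t List.mem_cons_self
    have hlts : ∀ q ∈ ts, InB n m q := fun q hq => hl q (List.mem_cons_of_mem _ hq)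
    simp only [addAll, List.foldl_cons] at *
    by_cases hts : t ∈ seen
    · have hv : vget vis t.1 t.2 = true := (hm t hInB).mpr hts
      rw [show addOne (acc, vis) t = (acc, vis) from by simp [addOne, hv]]
      rw [show dedupNew (t :: ts) seen = dedupNew ts seen from by simp [dedupNew, hts]]
      exact ih acc vis seen hwf hm hlts
    · have hv : vget vis t.1 t.2 = false := by
        rcases (vget vis t.1 t.2).eq_false_or_eq_true with h | h
        · exact absurd ((hm t hInB).mp h) hts
        · exact h
      rw [show addOne (acc, vis) t = (acc ++ [t], vset vis t.1 t.2) from by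
        simp [addOne, hv]]
      have hwf' := vset_wf n m vis t hwf hInB
      have hm' := Marks_vset n m vis seen t hwf hInB hm
      obtain ⟨i1, i2, i3, i4⟩ := ih (acc ++ [t]) (vset vis t.1 t.2) (seen ++ [t]) hwf' hm' hlts
      have hdd : dedupNew (t :: ts) seen = t :: dedupNew ts (seen ++ [t]) := by
        simp [dedupNew, hts]
      refine ⟨?_, i2, ?_, ?_⟩
      · rw [i1, hdd]
        simp
      · rw [hdd, show seen ++ t :: dedupNew ts (seen ++ [t])
            = (seen ++ [t]) ++ dedupNew ts (seen ++ [t]) from by simp]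
        exact i3
      · rw [hdd]
        have := Uc_vset n m vis t hwf hInB hv
        simp only [List.length_cons]
        omega

-- ---- bfsL level structure ----

lemma bfsL_hitG (board : List String) (N M : Int) :
    ∀ (cur : List (Int × Int)) (f : Nat) (next : List (Int × Int)) (d : Int)
      (vis : List (List Bool)),
      (∃ p ∈ cur, cellAt board p.1 p.2 = 'G') → cur.length ≤ f →
      bfsL board N M f cur next d vis = d := by
  intro cur
  induction cur with
  | nil => intro f next d vis hex hf; simp at hex
  | cons p cs ih =>
    intro f next d vis hex hf
    match f with
    | 0 => simp at hf
    | f + 1 =>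
      obtain ⟨x, y⟩ := p
      simp only [bfsL]
      by_cases hG : cellAt board x y = 'G'
      · rw [if_pos hG]
      · rw [if_neg hG]
        rcases hex with ⟨q, hq, hqG⟩
        rcases List.mem_cons.mp hq with h | h
        · rw [h] at hqG
          exact absurd hqG hG
        · exact ih f _ d _ ⟨q, h, hqG⟩ (by simpa using hf)

lemma bfsL_level (board : List String) (N M : Int) :
    ∀ (cur : List (Int × Int)) (f : Nat) (next : List (Int × Int)) (d : Int)
      (vis : List (List Bool)),
      (∀ p ∈ cur, cellAt board p.1 p.2 ≠ 'G') → cur.length ≤ f →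
      bfsL board N M f cur next d vis
        = bfsL board N M (f - cur.length) []
            (cur.foldl (fun st p => dirsA.foldl (stepL board N M p.1 p.2) st) (next, vis)).1 d
            (cur.foldl (fun st p => dirsA.foldl (stepL board N M p.1 p.2) st) (next, vis)).2 := by
  intro cur
  induction cur with
  | nil => intro f next d vis h hf; simp
  | cons p cs ih =>
    intro f next d vis h hf
    match f with
    | 0 => simp at hf
    | f + 1 =>
      obtain ⟨x, y⟩ := p
      simp only [bfsL, if_neg (h (x, y) List.mem_cons_self)]
      rw [ih f _ d _ (fun q hq => h q (List.mem_cons_of_mem _ hq)) (by simpa using hf)]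
      simp [Nat.succ_sub_succ]

lemma foldstep_eq_addAll (board : List String) (n m : Nat) (hn : board.length = n) :
    ∀ (cur : List (Int × Int)) (st : List (Int × Int) × List (List Bool)),
      (∀ p ∈ cur, InB n m p) →
      cur.foldl (fun st p => dirsA.foldl (stepL board (n : Int) (m : Int) p.1 p.2) st) st
        = addAll st (cur.flatMap (destsB board ((List.range m).map (colStr board)) n m)) := by
  intro cur
  induction cur with
  | nil => intro st h; rfl
  | cons p cs ih =>
    intro st hinb
    have hp := hinb p List.mem_cons_self
    simp only [List.foldl_cons, List.flatMap_cons]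
    rw [show addAll st (destsB board ((List.range m).map (colStr board)) n m p
          ++ cs.flatMap (destsB board ((List.range m).map (colStr board)) n m))
        = addAll (addAll st (destsB board ((List.range m).map (colStr board)) n m p))
            (cs.flatMap (destsB board ((List.range m).map (colStr board)) n m)) from
      List.foldl_append ..]
    rw [show dirsA.foldl (stepL board (n : Int) (m : Int) p.1 p.2) st
        = addAll st (destsB board ((List.range m).map (colStr board)) n m p) from ?_]
    · exact ih _ (fun q hq => hinb q (List.mem_cons_of_mem _ hq))
    · have hx : ((p.1.toNat : Nat) : Int) = p.1 := Int.toNat_of_nonneg hp.1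
      have hy : ((p.2.toNat : Nat) : Int) = p.2 := Int.toNat_of_nonneg hp.2.2.1
      have hmap := dests_eq board n m hn p.1.toNat p.2.toNat
        (by obtain ⟨a, b, c, d⟩ := hp; omega) (by obtain ⟨a, b, c, d⟩ := hp; omega)
      rw [hx, hy] at hmap
      rw [show (p.1, p.2) = p from rfl] at hmap
      rw [← hmap, addAll, List.foldl_map]
      rfl

-- ---- the main simulation: bfsL (node fuel) = bfsS (level fuel) ----

lemma main_sim (board : List String) (n m : Nat) (hn : board.length = n) :
    ∀ (fb fa : Nat) (cur seen : List (Int × Int)) (d : Int) (vis : List (List Bool)),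
      VisWF n m vis → Marks n m vis seen →
      (∀ p ∈ cur, InB n m p) → (∀ p ∈ seen, InB n m p) →
      cur.length + Uc vis ≤ fa → Uc vis + 2 ≤ fb →
      bfsL board (n : Int) (m : Int) fa cur [] d vis
        = bfsS board ((List.range m).map (colStr board)) n m fb cur seen d := by
  intro fb
  induction fb with
  | zero => intro fa cur seen d vis _ _ _ _ _ hfb; omega
  | succ fb ih =>
    intro fa cur seen d vis hwf hm hcur hseen hfa hfb
    match cur with
    | [] => simp [bfsL, bfsS]
    | p :: cs =>
      simp only [bfsS]
      by_cases hG : ∃ q ∈ p :: cs, cellAt board q.1 q.2 = 'G'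
      · have hany : (p :: cs).any (fun q => cellAt board q.1 q.2 == 'G') = true := by
          rw [List.any_eq_true]
          rcases hG with ⟨q, hq, hqG⟩
          exact ⟨q, hq, by simp [hqG]⟩
        rw [if_pos hany]
        exact bfsL_hitG board (n : Int) (m : Int) (p :: cs) fa [] d vis hG (by omega)
      · push_neg at hG
        have hany : (p :: cs).any (fun q => cellAt board q.1 q.2 == 'G') = false := by
          rw [List.any_eq_false]
          intro q hq
          simpa using hG q hq
        rw [if_neg (by simp [hany])]
        rw [bfsL_level board (n : Int) (m : Int) (p :: cs) fa [] d vis hG (by omega)]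
        rw [foldstep_eq_addAll board n m hn (p :: cs) ([], vis) hcur]
        have hLin : ∀ t ∈ (p :: cs).flatMap
            (destsB board ((List.range m).map (colStr board)) n m), InB n m t := by
          intro t ht
          rcases List.mem_flatMap.mp ht with ⟨q, hq, htq⟩
          exact dests_inb board n m _ q (hcur q hq) t htq
        obtain ⟨e1, e2, e3, e4⟩ := addAll_spec board n m
          ((p :: cs).flatMap (destsB board ((List.range m).map (colStr board)) n m))
          [] vis seen hwf hm hLin
        rw [e1, dedupNew_eq_diff, List.nil_append]
        set L := (p :: cs).flatMap (destsB board ((List.range m).map (colStr board)) n m)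
          with hL
        have hFdiff : PySem.Set.diff (PySem.Set.ofList L) seen = dedupNew L seen :=
          dedupNew_eq_diff L seen
        have hFnodup : (dedupNew L seen).Nodup := by
          rw [← hFdiff]
          exact PySem.Set.nodup_diff _ seen (PySem.Set.nodup_ofList L)
        have hFdisj : ∀ x ∈ dedupNew L seen, x ∉ seen := by
          intro x hx
          rw [← hFdiff] at hx
          exact ((PySem.Set.mem_diff _ _ _).mp hx).2
        have hunion : PySem.Set.union seen (dedupNew L seen) = seen ++ dedupNew L seen := by
          unfold PySem.Set.union
          exact PySem.Set.update_eq_append_of_disjoint seen _ hFnodup hFdisj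
        have hFin : ∀ t ∈ dedupNew L seen, InB n m t :=
          fun t ht => hLin t (mem_dedupNew L seen t ht)
        rw [hunion]
        rcases hDD : dedupNew L seen with _ | ⟨t, ts⟩
        · rw [hDD] at e4
          match fb, hfb with
          | fb + 1, _ => simp [bfsL, bfsS]
        · rw [hDD] at e3 e4 hFin
          rw [show bfsL board (n : Int) (m : Int) (fa - (p :: cs).length) [] (t :: ts) d
                (addAll ([], vis) L).2
              = bfsL board (n : Int) (m : Int) (fa - (p :: cs).length) (t :: ts) [] (d + 1)
                (addAll ([], vis) L).2 from by simp [bfsL]]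
          apply ih (fa - (p :: cs).length) (t :: ts) (seen ++ (t :: ts)) (d + 1)
            (addAll ([], vis) L).2 e2 e3 hFin
            (by
              intro q hq
              rcases List.mem_append.mp hq with h | h
              · exact hseen q h
              · exact hFin q h)
            (by
              simp only [List.length_cons] at e4 hfa ⊢
              omega)
            (by
              simp only [List.length_cons] at e4
              omega)

-- initial visited matrix facts
lemma vget_base (n m : Nat) (x y : Int) :
    vget (List.replicate n (List.replicate m false)) x y = false := by
  simp only [vget, List.getD_eq_getElem?_getD, List.getElem?_replicate]
  split_ifs <;> simp_all [List.getD_eq_getElem?_getD, List.getElem?_replicate]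
  split_ifs <;> simp_all

lemma base_wf (n m : Nat) : VisWF n m (List.replicate n (List.replicate m false)) := by
  refine ⟨List.length_replicate, ?_⟩
  intro row h
  rw [List.eq_of_mem_replicate h]
  exact List.length_replicate

lemma Uc_base (n m : Nat) : Uc (List.replicate n (List.replicate m false)) = n * m := by
  simp [Uc, List.map_replicate, List.sum_replicate, smul_eq_mul, Nat.mul_comm]

-- ===== VERDICT (by name: the statement is the Claim_ definition above) =====
theorem solution_spec : Claim_equal_solution := by
  intro board _ _
  show solution board = solution_alt board
  simp only [solution, solution_alt]
  rw [findStart_eq board ((board.headD "").toList.length) 0]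
  have hid : (fun p : Nat × Nat => (p.1 + 0, p.2)) = id := funext fun p => by simp
  rw [hid, Option.map_id]
  have hc : ∀ i j : Nat, cellAt board (i : Int) (j : Int)
      = ((board.getD i "").toList.getD j ' ') := by
    intro i j; simp [cellAt]
  simp only [hc, id_eq]
  set n := board.length with hn
  set m := (board.headD "").toList.length with hm
  cases hA : (List.range n).findSome? (fun k =>
      (List.range m).findSome? (fun j =>
        if ((board.getD k "").toList.getD j ' ') = 'R' then some (k, j) else none)) with
  | none => rfl
  | some p =>
    obtain ⟨si, sj⟩ := p
    dsimp only
    obtain ⟨i, hi, hinner⟩ := List.exists_of_findSome?_eq_some hA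
    obtain ⟨j, hj, hcell⟩ := List.exists_of_findSome?_eq_some hinner
    have hij : i = si ∧ j = sj := by
      by_cases h : ((board.getD i "").toList.getD j ' ') = 'R'
      · rw [if_pos h] at hcell
        exact ⟨congrArg Prod.fst (Option.some.inj hcell),
          congrArg Prod.snd (Option.some.inj hcell)⟩
      · rw [if_neg h] at hcell
        exact absurd hcell (by simp)
    have hsi : si < n := by
      obtain ⟨h1, _⟩ := hij
      subst h1
      exact List.mem_range.mp hi
    have hsj : sj < m := by
      obtain ⟨_, h2⟩ := hij
      subst h2
      exact List.mem_range.mp hj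
    have hstart : InB n m ((si : Int), (sj : Int)) := by
      refine ⟨?_, ?_, ?_, ?_⟩
      · show (0 : Int) ≤ (si : Int)
        positivity
      · show ((si : Nat) : Int) < (n : Int)
        exact_mod_cast hsi
      · show (0 : Int) ≤ (sj : Int)
        positivity
      · show ((sj : Nat) : Int) < (m : Int)
        exact_mod_cast hsj
    set base := List.replicate n (List.replicate m false) with hbase
    set vis0 := vset base (si : Int) (sj : Int) with hvis0
    have hwf0 : VisWF n m vis0 := vset_wf n m base _ (base_wf n m) hstart
    have hm0 : Marks n m vis0 [((si : Int), (sj : Int))] := by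
      intro q hq
      by_cases hqs : q = ((si : Int), (sj : Int))
      · subst hqs
        have := vget_vset_self n m base ((si : Int), (sj : Int)) (base_wf n m) hq
        simp [hvis0, this]
      · rw [hvis0, vget_vset_other n m base _ q (base_wf n m) hstart hq hqs, vget_base]
        simp [hqs]
    have hUc0 : Uc vis0 + 1 = n * m := by
      rw [hvis0, Uc_vset n m base _ (base_wf n m) hstart (vget_base n m _ _), Uc_base]
    have hsim := sim board (n : Int) (m : Int) (n * m + 1) (si : Int) (sj : Int) [] [] 0 vis0
    simp only [mapD_nil, List.append_nil] at hsim
    rw [hsim]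
    exact main_sim board n m rfl (n * m + 2) (n * m + 1)
      [((si : Int), (sj : Int))] [((si : Int), (sj : Int))] 0 vis0 hwf0 hm0
      (by intro q hq; rw [List.mem_singleton.mp hq]; exact hstart)
      (by intro q hq; rw [List.mem_singleton.mp hq]; exact hstart)
      (by simp only [List.length_cons, List.length_nil]; omega)
      (by omega)
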